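-- pv_equiv track=rewrite | github.com/jcarlosroldan/tuenti-challenge | 9/6/solve.py | less_than_relations
-- ===== SOURCE A (Python) =====
-- def less_than_relations(words):
-- 	res = set()
-- 	starts = [w[0] for w in words]
-- 	for s1, s2 in zip(starts[:-1], starts[1:]):
-- 		if s1 != s2:
-- 			res.add((s1, s2))
-- 	for start in starts:
-- 		subwords = [w[1:] for w in words if w.startswith(start) and len(w) > 1]
-- 		res.update(less_than_relations(subwords))
-- 	return res
-- ===== SOURCE B (Python) =====
-- def less_than_relations(words):
-- 	res = set()
-- 	groups = {}
-- 	prev = None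
-- 	for w in words:
-- 		c = w[0]
-- 		if prev is not None and c != prev:
-- 			res.add((prev, c))
-- 		prev = c
-- 		groups.setdefault(c, [])
-- 		if len(w) > 1:
-- 			groups[c].append(w[1:])
-- 	for sub in groups.values():
-- 		res |= less_than_relations(sub)
-- 	return res
-- ===== Notes on version B (the rewrite author's own statement) =====
-- stated objective: faster
-- what changed: A re-runs the whole filter+recursion once per word (one recursive call for every occurrence of a first character, exponential on duplicate-heavy inputs); B makes a single pass that emits adjacent-pair relations with a prev variable and groups the tails in a dict keyed by first character, then recurses exactly once per distinct first character.
import Mathlib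
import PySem

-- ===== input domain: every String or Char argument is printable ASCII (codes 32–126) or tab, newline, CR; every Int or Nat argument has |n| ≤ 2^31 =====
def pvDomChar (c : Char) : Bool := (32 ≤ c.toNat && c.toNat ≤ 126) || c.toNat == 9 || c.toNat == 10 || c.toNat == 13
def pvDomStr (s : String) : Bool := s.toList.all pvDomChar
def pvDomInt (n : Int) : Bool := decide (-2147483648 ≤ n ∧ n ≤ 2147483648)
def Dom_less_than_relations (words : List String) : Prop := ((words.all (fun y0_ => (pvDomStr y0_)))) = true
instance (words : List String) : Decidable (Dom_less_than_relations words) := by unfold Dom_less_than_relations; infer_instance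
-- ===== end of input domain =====

-- B replaces A's per-occurrence recursion (one recursive call for EVERY word) by one recursive
-- call per DISTINCT first character, grouping the tails in a single dict-building pass (faster).

-- ===== PORT A =====
-- Termination measure: total number of characters (used by both ports' decreasing_by).
def pvLenSum (ws : List String) : Nat := (ws.map (fun w => w.toList.length)).sum

lemma pvLenSum_tails_le (p : String → Bool) (ws : List String) :
    pvLenSum ((ws.filter p).map (fun w => PySem.Str.slice w (some 1) none)) ≤ pvLenSum ws := by
  induction ws with
  | nil => simp [pvLenSum]
  | cons w t ih =>
    have hsl : (PySem.Str.slice w (some 1) none).toList.length = w.toList.length - 1 := by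
      rw [PySem.Str.toList_slice, PySem.Chars.slice_eq_listSlice,
        PySem.List.slice_from _ (by norm_num)]
      simp
    by_cases hp : p w
    · rw [List.filter_cons_of_pos hp]
      simp only [List.map_cons, pvLenSum, List.sum_cons] at ih ⊢
      omega
    · rw [List.filter_cons_of_neg hp]
      simp only [pvLenSum, List.map_cons, List.sum_cons] at ih ⊢
      omega

lemma pvLenSum_tails_lt (p : String → Bool) (ws : List String)
    (hne : ws ≠ []) (hall : ∀ w ∈ ws, w ≠ "") :
    pvLenSum ((ws.filter p).map (fun w => PySem.Str.slice w (some 1) none)) < pvLenSum ws := by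
  cases ws with
  | nil => exact absurd rfl hne
  | cons w t =>
    have hw : w.toList ≠ [] := by
      simp only [ne_eq, String.toList_eq_nil_iff]
      exact hall w (by simp)
    have h1 : 1 ≤ w.toList.length := by
      cases hl : w.toList with
      | nil => exact absurd hl hw
      | cons a b => simp
    have hsl : (PySem.Str.slice w (some 1) none).toList.length = w.toList.length - 1 := by
      rw [PySem.Str.toList_slice, PySem.Chars.slice_eq_listSlice,
        PySem.List.slice_from _ (by norm_num)]
      simp
    have ht := pvLenSum_tails_le p t
    by_cases hp : p w
    · rw [List.filter_cons_of_pos hp]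
      simp only [List.map_cons, pvLenSum, List.sum_cons] at ht ⊢
      omega
    · rw [List.filter_cons_of_neg hp]
      simp only [pvLenSum, List.map_cons, List.sum_cons] at ht ⊢
      omega

-- w[0] as the 1-character string Python produces (the .getD "" is unreachable: empty words are
-- caught by the guard below, where Python raises IndexError — outside Pre_).
def pvFirst (w : String) : String := ((PySem.Str.pyGet? w 0).map (fun c => String.ofList [c])).getD ""

-- [w[1:] for w in words if w.startswith(start) and len(w) > 1]
def pvSubwords (words : List String) (start : String) : List String :=
  (words.filter (fun w => PySem.Str.startswith w start && decide (1 < PySem.Str.len w))).map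
    (fun w => PySem.Str.slice w (some 1) none)

def less_than_relations (words : List String) : List (String × String) :=
  if hguard : words.contains "" then [] else  -- totality guard: Python raises IndexError here
  let starts := words.map pvFirst
  let res : PySem.Set (String × String) :=
    ((PySem.List.slice starts none (some (-1))).zip (PySem.List.slice starts (some 1) none)).foldl
      (fun r p => if p.1 ≠ p.2 then PySem.Set.add r p else r) PySem.Set.empty
  starts.attach.foldl
    (fun r s => PySem.Set.update r (less_than_relations (pvSubwords words s.1))) res
termination_by pvLenSum words
decreasing_by
  have hne : words ≠ [] := by
    rcases s with ⟨c, hc⟩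
    intro h; subst h; simp [starts] at hc
  have hall : ∀ w ∈ words, w ≠ "" := by
    intro w hw hweq
    exact hguard (by subst hweq; simpa [List.contains_iff_mem] using hw)
  exact pvLenSum_tails_lt _ words hne hall

-- ===== PORT B =====
-- one step of B's single pass, res/prev component: emit the adjacent pair of first characters
def pvPairStep (rp : PySem.Set (String × String) × Option String) (w : String) :
    PySem.Set (String × String) × Option String :=
  let c := pvFirst w
  (match rp.2 with
   | some p => if c ≠ p then PySem.Set.add rp.1 (p, c) else rp.1
   | none => rp.1, some c)

-- one step of B's single pass, groups component: groups.setdefault(c, []); append w[1:] if len(w) > 1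
def pvGroupStep (d : PySem.Dict String (List String)) (w : String) : PySem.Dict String (List String) :=
  let c := pvFirst w
  let d1 := d.setdefault c []
  if 1 < PySem.Str.len w then d1.modify c [] (fun l => l ++ [PySem.Str.slice w (some 1) none]) else d1

lemma pvGroupStep_getD (d : PySem.Dict String (List String)) (w : String) (c : String) :
    (pvGroupStep d w).getD c [] =
      d.getD c [] ++ (if pvFirst w == c && decide (1 < PySem.Str.len w)
        then [PySem.Str.slice w (some 1) none] else []) := by
  unfold pvGroupStep
  by_cases hl : 1 < PySem.Str.len w
  · simp only [if_pos hl]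
    by_cases hc : c = pvFirst w
    · subst hc
      rw [PySem.Dict.getD_modify_self, PySem.Dict.getD_setdefault_self]
      have hl' : 1 < w.length := by
        rw [PySem.Str.len_eq] at hl
        have h : 1 < w.toList.length := by exact_mod_cast hl
        simpa using h
      simp [hl']
    · rw [PySem.Dict.getD_modify_of_ne _ _ _ hc]
      have h2 := PySem.Dict.get?_setdefault_of_ne d ([] : List String) hc
      simp only [PySem.Dict.getD_eq_get?_getD, h2]
      have : (pvFirst w == c) = false := by
        simp only [beq_eq_false_iff_ne]; exact fun h => hc h.symm
      simp [this]
  · simp only [if_neg hl]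
    by_cases hc : c = pvFirst w
    · subst hc
      rw [PySem.Dict.getD_setdefault_self]
      have hl' : ¬ 1 < w.length := by
        rw [PySem.Str.len_eq] at hl
        intro h
        exact hl (by exact_mod_cast (by simpa using h : 1 < w.toList.length))
      simp [hl']
    · have h2 := PySem.Dict.get?_setdefault_of_ne d ([] : List String) hc
      simp only [PySem.Dict.getD_eq_get?_getD, h2]
      have hb : (pvFirst w == c) = false := by
        simp only [beq_eq_false_iff_ne]; exact fun h => hc h.symm
      simp [hb]

-- the dict built by B's pass holds, per first character c, exactly A's "subwords" for c
lemma pvGroups_getD (ws : List String) (d : PySem.Dict String (List String)) (c : String) :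
    (ws.foldl pvGroupStep d).getD c [] =
      d.getD c [] ++ (ws.filter (fun w => pvFirst w == c && decide (1 < PySem.Str.len w))).map
        (fun w => PySem.Str.slice w (some 1) none) := by
  induction ws generalizing d with
  | nil => simp
  | cons w t ih =>
    rw [List.foldl_cons, ih, pvGroupStep_getD]
    simp only [List.filter_cons]
    by_cases hp : (pvFirst w == c && decide (1 < PySem.Str.len w)) = true
    · rw [if_pos hp, if_pos hp]
      simp
    · rw [if_neg hp, if_neg hp]
      simp

lemma pvGroupStep_keys (d : PySem.Dict String (List String)) (w : String) :
    (pvGroupStep d w).keys = PySem.Set.add d.keys (pvFirst w) := by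
  unfold pvGroupStep
  have hsd : (d.setdefault (pvFirst w) []).keys = PySem.Set.add d.keys (pvFirst w) := by
    rw [PySem.Dict.keys_setdefault, PySem.Set.add_eq_ite]
    by_cases h : d.contains (pvFirst w) = true
    · rw [if_pos h, if_pos ((PySem.Dict.contains_iff_mem_keys d _).mp h)]
    · rw [if_neg h, if_neg (fun hm => h ((PySem.Dict.contains_iff_mem_keys d _).mpr hm))]
  by_cases hl : 1 < PySem.Str.len w
  · rw [if_pos hl, PySem.Dict.keys_modify, PySem.Dict.keys_insert_of_contains, hsd]
    rw [PySem.Dict.contains_setdefault]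
    simp
  · rw [if_neg hl, hsd]

-- B's dict keys are the distinct first characters, in first-occurrence order
lemma pvGroups_keys (ws : List String) (d : PySem.Dict String (List String)) :
    (ws.foldl pvGroupStep d).keys = PySem.Set.update d.keys (ws.map pvFirst) := by
  induction ws generalizing d with
  | nil => simp [PySem.Set.update]
  | cons w t ih =>
    rw [List.foldl_cons, ih, pvGroupStep_keys, List.map_cons, PySem.Set.update_cons]

-- the groups component of B's single combined pass (cited in decreasing_by and the main proof)
lemma pvStSnd {β : Type} (key : β → String) (l : List β) :
    ∀ (a : PySem.Set (String × String) × Option String) (b : PySem.Dict String (List String)),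
    (l.foldl (fun s x => (pvPairStep s.1 (key x), pvGroupStep s.2 (key x))) (a, b)).2
      = (l.map key).foldl pvGroupStep b := by
  induction l with
  | nil => intro a b; rfl
  | cons x t ih =>
    intro a b
    rw [List.foldl_cons, List.map_cons, List.foldl_cons]
    exact ih _ _

-- every group is strictly smaller than the input: B's recursion terminates (cited in decreasing_by)
lemma pvAltValue_lt (words : List String) (hguard : ¬ words.contains "" = true)
    (g : List String) (hg : g ∈ (words.foldl pvGroupStep PySem.Dict.empty).values) :
    pvLenSum g < pvLenSum words := by
  have hnd : (words.foldl pvGroupStep PySem.Dict.empty).keys.Nodup := by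
    rw [pvGroups_keys, PySem.Dict.keys_empty, PySem.Set.update_nil_left]
    exact PySem.Set.nodup_ofList _
  rw [PySem.Dict.values_eq_map_keys _ hnd []] at hg
  obtain ⟨k, hk, hgk⟩ := List.mem_map.mp hg
  rw [pvGroups_getD, PySem.Dict.getD_empty, List.nil_append] at hgk
  subst hgk
  have hne : words ≠ [] := by
    intro h; subst h
    simp [PySem.Dict.keys_empty] at hk
  have hall : ∀ w ∈ words, w ≠ "" := by
    intro w hw hweq
    exact hguard (by subst hweq; simpa [List.contains_iff_mem] using hw)
  exact pvLenSum_tails_lt _ words hne hall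

def less_than_relations_alt (words : List String) : List (String × String) :=
  if hguard : words.contains "" then [] else  -- totality guard: Python raises IndexError here
  let st := words.foldl (fun s w => (pvPairStep s.1 w, pvGroupStep s.2 w))
    (((PySem.Set.empty : PySem.Set (String × String)), (none : Option String)),
      (PySem.Dict.empty : PySem.Dict String (List String)))
  st.2.values.attach.foldl
    (fun r g => PySem.Set.update r (less_than_relations_alt g.1)) st.1.1
termination_by pvLenSum words
decreasing_by
  rcases g with ⟨g, hg⟩
  simp only [st] at hg
  rw [pvStSnd Subtype.val words.attach, List.attach_map_subtype_val] at hg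
  exact pvAltValue_lt words hguard g hg

-- ===== PRECONDITION & SPEC =====
-- Pre_ excludes exactly the inputs containing the empty string, on which Python A (and B)
-- raises IndexError at w[0].
def Pre_less_than_relations (words : List String) : Prop := ¬ ("" ∈ words)
instance (words : List String) : Decidable (Pre_less_than_relations words) := by
  unfold Pre_less_than_relations; infer_instance
def pvWitness_less_than_relations : List String := ["ba", "ab", "b"]
def Spec_less_than_relations (words : List String) (out : List (String × String)) : Prop :=
  out = less_than_relations_alt words
instance (words : List String) (out : List (String × String)) :
    Decidable (Spec_less_than_relations words out) := by
  unfold Spec_less_than_relations; infer_instance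

-- ===== CLAIM (what is proved, stated in full; the proofs are below) =====
def Claim_equal_less_than_relations : Prop := ∀ (words : List String),
  Dom_less_than_relations words → Pre_less_than_relations words →
    Spec_less_than_relations words (less_than_relations words)

-- ===== LEMMAS AND PROOFS =====
-- B's single combined pass splits into its pairs pass and its groups pass
lemma pvStEq (l : List String) :
    ∀ (a : PySem.Set (String × String) × Option String) (b : PySem.Dict String (List String)),
    l.foldl (fun s w => (pvPairStep s.1 w, pvGroupStep s.2 w)) (a, b)
      = (l.foldl pvPairStep a, l.foldl pvGroupStep b) := by
  induction l with
  | nil => intro a b; rfl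
  | cons x t ih =>
    intro a b
    rw [List.foldl_cons, List.foldl_cons, List.foldl_cons]
    exact ih _ _

lemma pvPairs_some (ws : List String) : ∀ (r : PySem.Set (String × String)) (p : String),
    (ws.foldl pvPairStep (r, some p)).1 =
      ((p :: ws.map pvFirst).zip (ws.map pvFirst)).foldl
        (fun r q => if q.1 ≠ q.2 then PySem.Set.add r q else r) r := by
  induction ws with
  | nil => intro r p; simp
  | cons w t ih =>
    intro r p
    rw [List.foldl_cons]
    have hstep : pvPairStep (r, some p) w =
        (if p ≠ pvFirst w then PySem.Set.add r (p, pvFirst w) else r, some (pvFirst w)) := by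
      simp only [pvPairStep, ne_comm]
    rw [hstep, List.map_cons, List.zip_cons_cons, List.foldl_cons, ih]

-- B's prev-based single pass computes A's fold over zip(starts, starts[1:])
lemma pvPairs_none (ws : List String) (r : PySem.Set (String × String)) :
    (ws.foldl pvPairStep (r, none)).1 =
      ((ws.map pvFirst).zip (ws.map pvFirst).tail).foldl
        (fun r q => if q.1 ≠ q.2 then PySem.Set.add r q else r) r := by
  cases ws with
  | nil => simp
  | cons w t =>
    rw [List.foldl_cons]
    have hstep : pvPairStep (r, none) w = (r, some (pvFirst w)) := rfl
    rw [hstep, pvPairs_some, List.map_cons]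
    simp

-- zip truncates, so A's zip(starts[:-1], starts[1:]) is zip(starts, starts[1:])
lemma pvZip_dropLast_tail {α : Type} (l : List α) : l.dropLast.zip l.tail = l.zip l.tail := by
  induction l with
  | nil => rfl
  | cons a t ih =>
    cases t with
    | nil => rfl
    | cons b u =>
      simp only [List.dropLast_cons₂, List.tail_cons, List.zip_cons_cons]
      simpa using ih

lemma pvUpdate_eq_self (r : PySem.Set (String × String)) (xs : List (String × String))
    (h : ∀ x ∈ xs, x ∈ r) : PySem.Set.update r xs = r := by
  rw [PySem.Set.update_eq_append_filter]
  have hf : (PySem.Set.ofList xs).filter (fun y => !r.contains y) = [] := by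
    rw [List.filter_eq_nil_iff]
    intro y hy
    have : y ∈ r := h y ((PySem.Set.mem_ofList _ _).mp hy)
    simp [this]
  rw [hf, List.append_nil]

-- updating res with F c once per occurrence = once per distinct c: later updates add nothing new
lemma pvFoldl_update_dedup (F : String → List (String × String)) :
    ∀ (l : List String) (s : PySem.Set String) (r : PySem.Set (String × String)),
    (∀ c ∈ s, ∀ x ∈ F c, x ∈ r) →
    l.foldl (fun r c => PySem.Set.update r (F c)) r
      = ((PySem.Set.update s l).drop s.length).foldl (fun r c => PySem.Set.update r (F c)) r := by
  intro l
  induction l with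
  | nil =>
    intro s r h
    rw [PySem.Set.update_eq_append_filter]
    simp
  | cons c t ih =>
    intro s r h
    rw [List.foldl_cons, PySem.Set.update_cons]
    by_cases hc : c ∈ s
    · rw [PySem.Set.add_of_mem hc]
      have hFc : PySem.Set.update r (F c) = r := pvUpdate_eq_self r (F c) (h c hc)
      rw [hFc]
      exact ih s r h
    · rw [PySem.Set.add_of_not_mem hc]
      have hlen : (s ++ [c]).length = s.length + 1 := by simp
      have hpre : PySem.Set.update (s ++ [c]) t = (s ++ [c]) ++
          ((PySem.Set.ofList t).filter (fun y => !(PySem.Set.contains (s ++ [c]) y))) :=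
        PySem.Set.update_eq_append_filter _ _
      have hdrop : (PySem.Set.update (s ++ [c]) t).drop s.length =
          c :: ((PySem.Set.ofList t).filter (fun y => !(PySem.Set.contains (s ++ [c]) y))) := by
        rw [hpre, List.append_assoc, List.drop_left, List.singleton_append]
      rw [hdrop, List.foldl_cons]
      have h' : ∀ c' ∈ (s ++ [c] : List String), ∀ x ∈ F c',
          x ∈ PySem.Set.update r (F c) := by
        intro c' hc' x hx
        rcases List.mem_append.mp hc' with h1 | h1
        · exact (PySem.Set.mem_update _ _ _).mpr (Or.inl (h c' h1 x hx))
        · rw [List.mem_singleton] at h1; subst h1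
          exact (PySem.Set.mem_update _ _ _).mpr (Or.inr hx)
      have hih := ih (s ++ [c]) (PySem.Set.update r (F c)) h'
      have htail : (PySem.Set.update (s ++ [c]) t).drop ((s ++ [c]).length) =
          (PySem.Set.ofList t).filter (fun y => !(PySem.Set.contains (s ++ [c]) y)) := by
        rw [hpre, List.drop_left]
      rw [htail] at hih
      exact hih

lemma pvFoldl_update_ofList (F : String → List (String × String)) (l : List String)
    (r : PySem.Set (String × String)) :
    l.foldl (fun r c => PySem.Set.update r (F c)) r
      = (PySem.Set.ofList l).foldl (fun r c => PySem.Set.update r (F c)) r := by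
  have h := pvFoldl_update_dedup F l [] r (by intro c hc; simp at hc)
  rw [PySem.Set.update_nil_left] at h
  simpa using h

-- for nonempty w and a 1-character start, w.startswith(start) is "first char of w = start"
lemma pvStartswith_first (w : String) (a : Char) (hw : w.toList ≠ []) :
    PySem.Str.startswith w (String.ofList [a]) = (pvFirst w == String.ofList [a]) := by
  cases hlw : w.toList with
  | nil => exact absurd hlw hw
  | cons b t =>
    have hfw : pvFirst w = String.ofList [b] := by
      unfold pvFirst
      rw [show PySem.Str.pyGet? w 0 = PySem.List.pyGet? w.toList 0 from by
        rw [PySem.Str.pyGet?_eq, PySem.Chars.pyGet?_eq_listPyGet?], hlw,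
        show (0:Int) = ((0:Nat):Int) from rfl, PySem.List.pyGet?_natCast]
      rfl
    have hs : PySem.Str.startswith w (String.ofList [a]) = true ↔ [a] <+: w.toList := by
      simp [PySem.Chars.startswith_iff]
    by_cases hab : a = b
    · subst hab
      have hL : PySem.Str.startswith w (String.ofList [a]) = true :=
        hs.mpr (by rw [hlw]; exact ⟨t, rfl⟩)
      rw [hL, hfw]
      simp
    · have h1 : ¬ ([a] <+: w.toList) := by
        rw [hlw]
        simp [List.cons_prefix_cons, hab]
      have hL : PySem.Str.startswith w (String.ofList [a]) = false := by
        by_contra hb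
        rw [Bool.not_eq_false] at hb
        exact h1 (hs.mp hb)
      have hR : (pvFirst w == String.ofList [a]) = false := by
        rw [hfw, beq_eq_false_iff_ne]
        intro he
        apply hab
        have := congrArg String.toList he
        simpa using this.symm
      rw [hL, hR]

-- A's per-start comprehension = B's group for that start
lemma pvSubwords_eq (words : List String) (hall : ∀ w ∈ words, w ≠ "") (c : String)
    (hc : c ∈ words.map pvFirst) :
    pvSubwords words c =
      (words.filter (fun w => pvFirst w == c && decide (1 < PySem.Str.len w))).map
        (fun w => PySem.Str.slice w (some 1) none) := by
  obtain ⟨v, hv, hvc⟩ := List.mem_map.mp hc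
  have hvl : v.toList ≠ [] := by
    simp only [ne_eq, String.toList_eq_nil_iff]
    exact hall v hv
  obtain ⟨a, u, hau⟩ : ∃ a u, v.toList = a :: u := by
    cases h : v.toList with
    | nil => exact absurd h hvl
    | cons a u => exact ⟨a, u, rfl⟩
  have hca : c = String.ofList [a] := by
    rw [← hvc]
    unfold pvFirst
    rw [show PySem.Str.pyGet? v 0 = PySem.List.pyGet? v.toList 0 from by
      rw [PySem.Str.pyGet?_eq, PySem.Chars.pyGet?_eq_listPyGet?], hau,
      show (0:Int) = ((0:Nat):Int) from rfl, PySem.List.pyGet?_natCast]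
    rfl
  unfold pvSubwords
  congr 1
  apply List.filter_congr
  intro w hw
  have hwl : w.toList ≠ [] := by
    simp only [ne_eq, String.toList_eq_nil_iff]
    exact hall w hw
  rw [hca, pvStartswith_first w a hwl]

-- main equivalence, by strong induction on the total number of characters
lemma pvMain : ∀ (n : Nat) (words : List String), pvLenSum words ≤ n →
    less_than_relations words = less_than_relations_alt words := by
  intro n
  induction n using Nat.strong_induction_on with
  | _ n ih =>
    intro words hn
    rw [less_than_relations, less_than_relations_alt]
    by_cases hguard : words.contains "" = true
    · rw [dif_pos hguard, dif_pos hguard]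
    · rw [dif_neg hguard, dif_neg hguard]
      have hall : ∀ w ∈ words, w ≠ "" := by
        intro w hw hweq
        exact hguard (by subst hweq; simpa [List.contains_iff_mem] using hw)
      dsimp only
      rw [pvStEq words]
      dsimp only
      rw [List.foldl_attach (f := fun r c =>
        PySem.Set.update r (less_than_relations (pvSubwords words c)))]
      rw [List.foldl_attach (f := fun r g =>
        PySem.Set.update r (less_than_relations_alt g))]
      -- the starting sets of the two recursion folds agree
      have hres : ((PySem.List.slice (words.map pvFirst) none (some (-1))).zip
            (PySem.List.slice (words.map pvFirst) (some 1) none)).foldl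
            (fun r p => if p.1 ≠ p.2 then PySem.Set.add r p else r) PySem.Set.empty
          = (words.foldl pvPairStep (PySem.Set.empty, none)).1 := by
        rw [pvPairs_none]
        have h1 : PySem.List.slice (words.map pvFirst) none (some (-1))
            = (words.map pvFirst).dropLast := by simp [pysem]
        have h2 : PySem.List.slice (words.map pvFirst) (some 1) none
            = (words.map pvFirst).tail := by
          rw [PySem.List.slice_from _ (by norm_num)]
          simp [List.drop_one]
        rw [h1, h2, pvZip_dropLast_tail]
      -- B's values fold = fold over the distinct starts of the groups
      have hnd : (words.foldl pvGroupStep PySem.Dict.empty).keys.Nodup := by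
        rw [pvGroups_keys, PySem.Dict.keys_empty, PySem.Set.update_nil_left]
        exact PySem.Set.nodup_ofList _
      have hkeys : (words.foldl pvGroupStep PySem.Dict.empty).keys
          = PySem.Set.ofList (words.map pvFirst) := by
        rw [pvGroups_keys, PySem.Dict.keys_empty, PySem.Set.update_nil_left]
      have hgetD : ∀ k, (words.foldl pvGroupStep PySem.Dict.empty).getD k []
          = (words.filter (fun w => pvFirst w == k && decide (1 < PySem.Str.len w))).map
              (fun w => PySem.Str.slice w (some 1) none) := by
        intro k
        rw [pvGroups_getD, PySem.Dict.getD_empty, List.nil_append]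
      -- A's fold: replace each recursive value by B's, by the inductive hypothesis
      rw [PySem.List.foldl_congr_mem (words.map pvFirst)
        (fun r c => PySem.Set.update r (less_than_relations (pvSubwords words c)))
        (fun r c => PySem.Set.update r (less_than_relations_alt
          ((words.filter (fun w => pvFirst w == c && decide (1 < PySem.Str.len w))).map
            (fun w => PySem.Str.slice w (some 1) none)))) _ ?_]
      · rw [hres, pvFoldl_update_ofList (fun c => less_than_relations_alt
          ((words.filter (fun w => pvFirst w == c && decide (1 < PySem.Str.len w))).map
            (fun w => PySem.Str.slice w (some 1) none)))]
        rw [PySem.Dict.values_eq_map_keys _ hnd [], hkeys]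
        simp only [hgetD]
        rw [List.foldl_map]
      · intro acc c hc
        dsimp only
        have hnew : words ≠ [] := by
          intro h; subst h; simp at hc
        have hsub := pvSubwords_eq words hall c hc
        have hlt : pvLenSum ((words.filter
            (fun w => pvFirst w == c && decide (1 < PySem.Str.len w))).map
              (fun w => PySem.Str.slice w (some 1) none)) < pvLenSum words :=
          pvLenSum_tails_lt _ words hnew hall
        rw [hsub, ih _ (lt_of_lt_of_le hlt hn) _ (le_refl _)]

-- ===== VERDICT (by name: the statement is the Claim_ definition above) =====
theorem less_than_relations_spec : Claim_equal_less_than_relations := by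
  intro words _ _
  unfold Spec_less_than_relations
  exact pvMain (pvLenSum words) words (le_refl _)
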